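-- pv_equiv track=rewrite | github.com/meanna/NLP_Uni_Projekts | 3_Elternannotation/annotate.py | read_label
-- ===== SOURCE A (Python) =====
-- def read_label(tree, pos):
--     """
--     Read a label of a given trie from a given position. Return the label and the end position.
--
--     In case of a terminal symbol, end position is set to be at the next ")".
--     In case of a non-terminal symbol, end position is set to be at either "(" or the next terminal label.
--
--     """
--     label = ""
--     while pos < len(tree):
--         if tree[pos].isalnum():
--             label += tree[pos]
--             pos += 1
--         elif len(label) > 0:
--             if tree[pos] == " ":
--                 return label, pos + 1
--             elif tree[pos] == ")":
--                 return label, pos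
--             else:  # a label can either ends with a space or ")", otherwise it is an error
--                 raise SyntaxError("error at -> " + tree[pos:])
--         else:  # a label must have at least one character, otherwise it is an error
--             raise SyntaxError("error at -> " + tree[pos:])
-- ===== SOURCE B (Python) =====
-- def read_label(tree, pos):
--     start = pos
--     while pos < len(tree) and tree[pos].isalnum():
--         pos += 1
--     if pos >= len(tree):
--         return None
--     label = tree[start:pos]
--     if len(label) == 0:
--         raise SyntaxError("error at -> " + tree[pos:])
--     if tree[pos] == " ":
--         return label, pos + 1
--     if tree[pos] == ")":
--         return label, pos
--     raise SyntaxError("error at -> " + tree[pos:])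
-- ===== Notes on version B (the rewrite author's own statement) =====
-- stated objective: simpler
-- what changed: A classifies every character inside one loop that also accumulates the label string char-by-char; B runs a scan loop that only advances the position over alphanumerics, builds the label with one slice, and dispatches on the terminator once, after the loop.
-- outside the precondition, e.g. on read_label(' a', -1): A returns ('a', 1), B raises SyntaxError
import Mathlib
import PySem

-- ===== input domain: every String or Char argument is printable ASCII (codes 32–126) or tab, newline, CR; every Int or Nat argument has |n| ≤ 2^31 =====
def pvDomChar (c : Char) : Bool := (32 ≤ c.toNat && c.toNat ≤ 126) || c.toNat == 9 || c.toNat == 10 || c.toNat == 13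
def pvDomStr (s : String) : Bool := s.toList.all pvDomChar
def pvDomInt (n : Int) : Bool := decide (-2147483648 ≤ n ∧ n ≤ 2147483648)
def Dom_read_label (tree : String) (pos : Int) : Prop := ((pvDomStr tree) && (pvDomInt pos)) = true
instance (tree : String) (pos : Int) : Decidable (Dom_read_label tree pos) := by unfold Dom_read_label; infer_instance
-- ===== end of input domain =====

-- B differs from A by decomposition: A's single loop both accumulates the label and
-- classifies each character; B's loop only advances the position, the label is one slice
-- and the terminator dispatch happens once, after the loop.  Equivalence is about the
-- returned value; 'none' stands for both Python's None return and its raised exceptions,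
-- the raising inputs being excluded by Pre_read_label.

-- ===== PORT A =====
-- A's while-loop: state = (accumulated label, position); raise → none.
def readLabelAGo (l : List Char) (label : List Char) (pos : Int) : Option (String × Int) :=
  if _h : pos < (l.length : Int) then
    match PySem.List.pyGet? l pos with
    | none => none  -- IndexError (tree[pos] with pos < -len)
    | some c =>
      if PySem.Chars.isalnum c then
        readLabelAGo l (label ++ [c]) (pos + 1)
      else if label.length > 0 then
        if c = ' ' then some (String.ofList label, pos + 1)
        else if c = ')' then some (String.ofList label, pos)
        else none  -- raise SyntaxError
      else none    -- raise SyntaxError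
  else none        -- fall through the while: implicit 'return None'
termination_by ((l.length : Int) - pos).toNat
decreasing_by omega

def read_label (tree : String) (pos : Int) : Option (String × Int) :=
  readLabelAGo tree.toList [] pos

-- ===== PORT B =====
-- B's scan loop: advance pos while tree[pos] is alphanumeric; none = IndexError.
def readLabelBScan (l : List Char) (pos : Int) : Option Int :=
  if _h : pos < (l.length : Int) then
    match PySem.List.pyGet? l pos with
    | none => none  -- IndexError
    | some c => if PySem.Chars.isalnum c then readLabelBScan l (pos + 1) else some pos
  else some pos
termination_by ((l.length : Int) - pos).toNat
decreasing_by omega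

-- Source B after the loop: end-of-string check, label by one slice, terminator dispatch.
def readLabelBFinish (l : List Char) (start p : Int) : Option (String × Int) :=
  if (l.length : Int) ≤ p then none  -- 'if pos >= len(tree): return None'
  else
    let label := PySem.List.slice l (some start) (some p)  -- tree[start:pos]
    if label.length = 0 then none  -- raise SyntaxError
    else
      match PySem.List.pyGet? l p with
      | some c =>
        if c = ' ' then some (String.ofList label, p + 1)
        else if c = ')' then some (String.ofList label, p)
        else none  -- raise SyntaxError
      | none => none

def read_label_alt (tree : String) (pos : Int) : Option (String × Int) :=
  (readLabelBScan tree.toList pos).elim none (fun p => readLabelBFinish tree.toList pos p)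

-- ===== PRECONDITION & SPEC =====
-- Pre_ excludes (a) inputs where A raises (SyntaxError when the label is empty or is
-- followed by a character other than ' '/')', IndexError for pos < -len), and (b) negative
-- pos, on which A's value comes from Python's negative-index wraparound (an accident of
-- the implementation) and on which B raises SyntaxError.
def Pre_read_label (tree : String) (pos : Int) : Prop :=
  0 ≤ pos ∧
  ((tree.toList.drop pos.toNat).dropWhile PySem.Chars.isalnum = [] ∨
   ((tree.toList.drop pos.toNat).takeWhile PySem.Chars.isalnum ≠ [] ∧
    (((tree.toList.drop pos.toNat).dropWhile PySem.Chars.isalnum).head? = some ' ' ∨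
     ((tree.toList.drop pos.toNat).dropWhile PySem.Chars.isalnum).head? = some ')')))
instance (tree : String) (pos : Int) : Decidable (Pre_read_label tree pos) := by
  unfold Pre_read_label; infer_instance

def pvWitness_read_label : String × Int := ("(NP dog)", 1)

def Spec_read_label (tree : String) (pos : Int) (out : Option (String × Int)) : Prop := out = read_label_alt tree pos
instance (tree : String) (pos : Int) (out : Option (String × Int)) : Decidable (Spec_read_label tree pos out) := by unfold Spec_read_label; infer_instance

-- ===== CLAIM (what is proved, stated in full; the proofs are below) =====
def Claim_equal_read_label : Prop := ∀ (tree : String) (pos : Int), Dom_read_label tree pos → Pre_read_label tree pos → Spec_read_label tree pos (read_label tree pos)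

-- ===== LEMMAS AND PROOFS =====

-- The scan result never moves backwards.
lemma scan_ge (l : List Char) (pos p : Int) (h : readLabelBScan l pos = some p) : pos ≤ p := by
  unfold readLabelBScan at h
  split at h
  · rename_i hlt
    cases hg : PySem.List.pyGet? l pos with
    | none => rw [hg] at h; simp at h
    | some c =>
      rw [hg] at h
      by_cases ha : PySem.Chars.isalnum c
      · simp only [ha, if_true] at h
        have := scan_ge l (pos + 1) p h
        omega
      · simp [ha] at h
        omega
  · simp at h; omega
termination_by ((l.length : Int) - pos).toNat
decreasing_by omega

-- B's finish step with an accumulated prefix in front of the slice.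
def bFinishAcc (l label : List Char) (start p : Int) : Option (String × Int) :=
  if (l.length : Int) ≤ p then none
  else
    if (label ++ PySem.List.slice l (some start) (some p)).length = 0 then none
    else
      match PySem.List.pyGet? l p with
      | some c =>
        if c = ' ' then some (String.ofList (label ++ PySem.List.slice l (some start) (some p)), p + 1)
        else if c = ')' then some (String.ofList (label ++ PySem.List.slice l (some start) (some p)), p)
        else none
      | none => none

def bFull (l label : List Char) (pos : Int) : Option (String × Int) :=
  (readLabelBScan l pos).elim none (fun p => bFinishAcc l label pos p)

lemma slice_cons (l : List Char) (pos p : Int) (h0 : 0 ≤ pos) (hlt : pos < (l.length : Int))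
    (hp : pos + 1 ≤ p) :
    PySem.List.slice l (some pos) (some p) =
      l[pos.toNat]'(by omega) :: PySem.List.slice l (some (pos + 1)) (some p) := by
  rw [PySem.List.slice_toNat l h0 (by omega), PySem.List.slice_toNat l (by omega) (by omega)]
  have hdrop : l.drop pos.toNat = l[pos.toNat]'(by omega) :: l.drop (pos.toNat + 1) := by
    exact List.drop_eq_getElem_cons (by omega)
  rw [hdrop]
  have h1 : p.toNat - pos.toNat = (p.toNat - (pos + 1).toNat) + 1 := by omega
  have h2 : (pos + 1).toNat = pos.toNat + 1 := by omega
  rw [h1, h2, List.take_succ_cons]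

lemma main_lemma (l : List Char) (pos : Int) (label : List Char) (h0 : 0 ≤ pos) :
    readLabelAGo l label pos = bFull l label pos := by
  unfold readLabelAGo bFull
  by_cases hlt : pos < (l.length : Int)
  · simp only [hlt, dif_pos]
    cases hg : PySem.List.pyGet? l pos with
    | none =>
      exfalso
      rw [PySem.List.pyGet?_eq_none_iff] at hg
      exact hg ⟨by omega, hlt⟩
    | some c =>
      by_cases ha : PySem.Chars.isalnum c
      · simp only [ha, if_true]
        rw [main_lemma l (pos + 1) (label ++ [c]) (by omega)]
        unfold bFull
        conv_rhs => rw [readLabelBScan]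
        simp only [hlt, dif_pos, hg, ha, if_true]
        cases hs : readLabelBScan l (pos + 1) with
        | none => rfl
        | some p =>
          simp only [Option.elim_some]
          have hp : pos + 1 ≤ p := scan_ge l (pos + 1) p hs
          have hc : c = l[pos.toNat]'(by omega) := by
            have := PySem.List.pyGet?_eq_some_getElem (xs := l) (i := pos) h0 hlt
            rw [hg] at this; exact (Option.some.injEq _ _).mp this
          unfold bFinishAcc
          rw [slice_cons l pos p h0 hlt hp, hc]
          simp
      · conv_rhs => rw [readLabelBScan]
        simp only [hlt, dif_pos, hg, ha, Bool.false_eq_true, if_false, Option.elim_some]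
        unfold bFinishAcc
        have hsl : PySem.List.slice l (some pos) (some pos) = [] := by
          rw [PySem.List.slice_toNat l h0 h0]; simp
        rw [hsl]
        simp only [List.append_nil, if_neg (not_le.mpr hlt)]
        by_cases hlab : label.length > 0
        · have hnz : ¬ label.length = 0 := by omega
          simp [hlab, hnz, hg]
        · have hz : label.length = 0 := by omega
          simp [hz]
  · conv_rhs => rw [readLabelBScan]
    simp only [hlt, dif_neg, not_false_iff, Option.elim_some]
    unfold bFinishAcc
    rw [if_pos (by omega)]
termination_by ((l.length : Int) - pos).toNat
decreasing_by omega

lemma bFull_nil (l : List Char) (pos : Int) :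
    bFull l [] pos = (readLabelBScan l pos).elim none (fun p => readLabelBFinish l pos p) := by
  unfold bFull
  cases readLabelBScan l pos with
  | none => rfl
  | some p =>
    simp only [Option.elim_some]
    unfold bFinishAcc readLabelBFinish
    simp

-- ===== VERDICT (by name: the statement is the Claim_ definition above) =====
theorem read_label_spec : Claim_equal_read_label := by
  intro tree pos _hdom hpre
  unfold Spec_read_label read_label read_label_alt
  rw [main_lemma tree.toList pos [] hpre.1, bFull_nil]
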